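-- pv_equiv track=rewrite | github.com/acriles/Python-Project | src/tela_inicial.py | abreviar_nome
-- ===== SOURCE A (Python) =====
-- def abreviar_nome(nome = str) -> str:
--     item = nome
--     tamnaho = len(item)
--     login = ''
--     i = 0
--     space_atual = 0
--     quantidade_space = 0
--     for j in range(tamnaho):
--         if item[j] == ' ':
--             quantidade_space += 1
--     for i in range(tamnaho):
--         if item[i] != ' ' and space_atual == 0 or space_atual == quantidade_space:
--             login += item[i]
--         if space_atual != 0 and space_atual != quantidade_space and item[i] != ' ' and analise == 0:
--             login += item[i]
--             analise = 1
--         if item[i] == ' ':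
--             login += ' '
--             space_atual += 1
--             analise = 0
--     return login
-- ===== SOURCE B (Python) =====
-- def abreviar_nome(nome = str) -> str:
--     words = nome.split(' ')
--     last = len(words) - 1
--     return ' '.join(w if i == 0 or i == last else w[:1] for i, w in enumerate(words))
-- ===== Notes on version B (the rewrite author's own statement) =====
-- stated objective: simpler
-- what changed: Replaced A's two index loops with stateful space-counting and flag tracking (space_atual/analise) by a tokenize-then-map pass: split on the space character, keep the first and last words whole, map every middle word to its first character, and join the words back with spaces.
import Mathlib
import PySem

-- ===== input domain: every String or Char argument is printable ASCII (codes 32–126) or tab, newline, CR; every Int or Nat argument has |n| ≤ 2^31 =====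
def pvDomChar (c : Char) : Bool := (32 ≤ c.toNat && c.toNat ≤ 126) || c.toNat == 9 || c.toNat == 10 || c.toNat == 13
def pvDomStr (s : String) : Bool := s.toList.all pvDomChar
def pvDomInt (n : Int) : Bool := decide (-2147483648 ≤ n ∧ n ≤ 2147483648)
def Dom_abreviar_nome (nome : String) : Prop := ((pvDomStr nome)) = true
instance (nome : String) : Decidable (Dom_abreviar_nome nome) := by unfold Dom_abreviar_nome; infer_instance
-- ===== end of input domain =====

-- B replaces A's stateful char-by-char scan by split-on-space / keep-ends / map-initials / join (simpler; a timing run also measured it faster by a constant factor: C-level split/join vs per-char string concatenation).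


-- ===== PORT A =====
-- body of A's second loop; state = (login, space_atual, analise).  Python leaves `analise`
-- unbound until the first space; it is never read before that, so initializing it to 0 is exact.
def pvStepA (quantidade_space : Nat) (s : List Char × Nat × Nat) (c : Char) : List Char × Nat × Nat :=
  let login := s.1
  let sa := s.2.1
  let an := s.2.2
  -- if item[i] != ' ' and space_atual == 0 or space_atual == quantidade_space:
  let login := if (c ≠ ' ' ∧ sa = 0) ∨ sa = quantidade_space then login ++ [c] else login
  -- if space_atual != 0 and space_atual != quantidade_space and item[i] != ' ' and analise == 0:
  let p := if sa ≠ 0 ∧ sa ≠ quantidade_space ∧ c ≠ ' ' ∧ an = 0 then (login ++ [c], 1) else (login, an)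
  -- if item[i] == ' ':
  if c = ' ' then (p.1 ++ [' '], sa + 1, 0) else (p.1, sa, p.2)

def abreviar_nome (nome : String) : String :=
  let item := nome.toList                -- login accumulated as List Char (Python str concat), exact
  let tamnaho := PySem.List.len item
  let quantidade_space :=
    (PySem.List.pyRange 0 tamnaho).foldl
      (fun q j => if PySem.List.pyGetD item j ' ' = ' ' then q + 1 else q) (0 : Nat)
  let st :=
    (PySem.List.pyRange 0 tamnaho).foldl
      (fun s i => pvStepA quantidade_space s (PySem.List.pyGetD item i ' '))
      (([] : List Char), (0 : Nat), (0 : Nat))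
  String.ofList st.1

-- ===== PORT B =====
-- nome.split(' '): hand-written port of str.split with a one-character separator (exact)
def pvSplitSp : List Char → List (List Char)
  | [] => [[]]
  | c :: rest =>
    if c = ' ' then [] :: pvSplitSp rest
    else
      match pvSplitSp rest with
      | w :: ws => (c :: w) :: ws
      | [] => [[c]]

def abreviar_nome_alt (nome : String) : String :=
  let words := pvSplitSp nome.toList
  let last : Int := PySem.List.len words - 1
  -- ' '.join(w if i == 0 or i == last else w[:1] for i, w in enumerate(words));  w[:1] = w.take 1, exact
  String.ofList (PySem.Chars.join [' ']
    ((PySem.List.enumerate words).map (fun p => if p.1 = 0 ∨ p.1 = last then p.2 else p.2.take 1)))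

-- ===== PRECONDITION & SPEC =====
def Spec_abreviar_nome (nome : String) (out : String) : Prop := out = abreviar_nome_alt nome
instance (nome : String) (out : String) : Decidable (Spec_abreviar_nome nome out) := by unfold Spec_abreviar_nome; infer_instance

-- ===== CLAIM (what is proved, stated in full; the proofs are below) =====
def Claim_equal_abreviar_nome : Prop := ∀ (nome : String), Dom_abreviar_nome nome → Spec_abreviar_nome nome (abreviar_nome nome)

-- ===== LEMMAS AND PROOFS =====

-- recursive model of A's second loop: first = (space_atual = 0), an = analise;
-- uses the invariant quantidade_space = space_atual + (remaining spaces)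
def pvLoopA : List Char → Bool → Nat → List Char
  | [], _, _ => []
  | c :: rest, first, an =>
    if c = ' ' then ' ' :: pvLoopA rest false 0
    else if first ∨ rest.count ' ' = 0 then c :: pvLoopA rest first an
    else if an = 0 then c :: pvLoopA rest false 1
    else pvLoopA rest false an

-- counting loop computes List.count
theorem pvCount_eq (cs : List Char) (q : Nat) :
    cs.foldl (fun q c => if c = ' ' then q + 1 else q) q = q + cs.count ' ' := by
  induction cs generalizing q with
  | nil => simp
  | cons c rest ih =>
    by_cases h : c = ' ' <;> simp [List.foldl, h, List.count_cons, ih] <;> omega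

-- A's fold equals the model under the invariant
theorem pvFoldA_eq (Q : Nat) (cs : List Char) (login : List Char) (sa an : Nat)
    (hQ : Q = sa + cs.count ' ') :
    (cs.foldl (pvStepA Q) (login, sa, an)).1 = login ++ pvLoopA cs (decide (sa = 0)) an := by
  induction cs generalizing login sa an with
  | nil => simp [pvLoopA]
  | cons c rest ih =>
    rw [List.foldl_cons]
    by_cases hc : c = ' '
    · subst hc
      have hQ' : Q = (sa + 1) + rest.count ' ' := by
        rw [List.count_cons] at hQ; simp at hQ; omega
      have hne : sa ≠ Q := by omega
      rw [show pvStepA Q (login, sa, an) ' ' = (login ++ [' '], sa + 1, 0) by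
        simp [pvStepA, hne]]
      rw [ih _ (sa + 1) 0 hQ']
      simp [pvLoopA]
    · have hQ' : Q = sa + rest.count ' ' := by
        rw [List.count_cons] at hQ; simp [hc] at hQ; omega
      by_cases h0 : sa = 0
      · subst h0
        rw [show pvStepA Q (login, 0, an) c = (login ++ [c], 0, an) by
          simp [pvStepA, hc]]
        rw [ih _ 0 an hQ']
        simp [pvLoopA, hc]
      · by_cases hrc : rest.count ' ' = 0
        · have hs : sa = Q := by omega
          rw [show pvStepA Q (login, sa, an) c = (login ++ [c], sa, an) by
            simp [pvStepA, hc, hs, h0]]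
          rw [ih _ sa an hQ']
          simp [pvLoopA, hc, hrc, h0]
        · have hs : sa ≠ Q := by omega
          by_cases ha : an = 0
          · subst ha
            rw [show pvStepA Q (login, sa, 0) c = (login ++ [c], sa, 1) by
              simp [pvStepA, hc, hs, h0]]
            rw [ih _ sa 1 hQ']
            simp [pvLoopA, hc, hrc, h0]
          · rw [show pvStepA Q (login, sa, an) c = (login, sa, an) by
              simp [pvStepA, hc, hs, h0, ha]]
            rw [ih _ sa an hQ']
            simp [pvLoopA, hc, hrc, h0, ha]

-- a space-free string passes through unchanged
theorem pvLoopA_nospace (cs : List Char) (first : Bool) (an : Nat) (h : cs.count ' ' = 0) :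
    pvLoopA cs first an = cs := by
  induction cs generalizing first an with
  | nil => rfl
  | cons c rest ih =>
    have hc : c ≠ ' ' := by intro e; rw [e] at h; simp at h
    have hr : rest.count ' ' = 0 := by simpa [List.count_cons, hc] using h
    simp [pvLoopA, hc, hr, ih]

-- first word with a following space: copied whole
theorem pvLoopA_first (w rest : List Char) (an : Nat) (h : w.count ' ' = 0) :
    pvLoopA (w ++ ' ' :: rest) true an = w ++ ' ' :: pvLoopA rest false 0 := by
  induction w generalizing an with
  | nil => simp [pvLoopA]
  | cons c w' ih =>
    have hc : c ≠ ' ' := by intro e; rw [e] at h; simp at h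
    have hr : w'.count ' ' = 0 := by simpa [List.count_cons, hc] using h
    simp [pvLoopA, hc, ih _ hr]

-- middle word, initial already taken (an = 1): the rest of the word is skipped
theorem pvLoopA_skip (w rest : List Char) (h : w.count ' ' = 0) :
    pvLoopA (w ++ ' ' :: rest) false 1 = ' ' :: pvLoopA rest false 0 := by
  induction w with
  | nil => simp [pvLoopA]
  | cons c w' ih =>
    have hc : c ≠ ' ' := by intro e; rw [e] at h; simp at h
    have hr : w'.count ' ' = 0 := by simpa [List.count_cons, hc] using h
    have hs : (w' ++ ' ' :: rest).count ' ' ≠ 0 := by simp [List.count_append, List.count_cons]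
    simp [pvLoopA, hc, hs, ih hr]

-- middle word: only its first character is kept
theorem pvLoopA_mid (w rest : List Char) (h : w.count ' ' = 0) :
    pvLoopA (w ++ ' ' :: rest) false 0 = w.take 1 ++ ' ' :: pvLoopA rest false 0 := by
  cases w with
  | nil => simp [pvLoopA]
  | cons c w' =>
    have hc : c ≠ ' ' := by intro e; rw [e] at h; simp at h
    have hr : w'.count ' ' = 0 := by simpa [List.count_cons, hc] using h
    have hs : (w' ++ ' ' :: rest).count ' ' ≠ 0 := by simp [List.count_append, List.count_cons]
    simp [pvLoopA, hc, hs, pvLoopA_skip w' rest hr]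

-- decomposition at the first space
theorem pvSplitAtSpace (cs : List Char) (h : cs.count ' ' ≠ 0) :
    ∃ w r, cs = w ++ ' ' :: r ∧ w.count ' ' = 0 := by
  induction cs with
  | nil => simp at h
  | cons c rest ih =>
    by_cases hc : c = ' '
    · exact ⟨[], rest, by simp [hc], by simp⟩
    · have : rest.count ' ' ≠ 0 := by simpa [List.count_cons, hc] using h
      obtain ⟨w, r, hw, hw0⟩ := ih this
      exact ⟨c :: w, r, by simp [hw], by simp [List.count_cons, hc, hw0]⟩

-- pvSplitSp facts
theorem pvSplitSp_ne_nil (cs : List Char) : pvSplitSp cs ≠ [] := by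
  induction cs with
  | nil => simp [pvSplitSp]
  | cons c rest ih =>
    by_cases hc : c = ' '
    · simp [pvSplitSp, hc]
    · cases hsp : pvSplitSp rest with
      | nil => exact absurd hsp ih
      | cons w ws => simp [pvSplitSp, hc, hsp]

theorem pvSplitSp_nospace (cs : List Char) (h : cs.count ' ' = 0) : pvSplitSp cs = [cs] := by
  induction cs with
  | nil => rfl
  | cons c rest ih =>
    have hc : c ≠ ' ' := by intro e; rw [e] at h; simp at h
    have hr : rest.count ' ' = 0 := by simpa [List.count_cons, hc] using h
    simp [pvSplitSp, hc, ih hr]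

theorem pvSplitSp_append (w rest : List Char) (h : w.count ' ' = 0) :
    pvSplitSp (w ++ ' ' :: rest) = w :: pvSplitSp rest := by
  induction w with
  | nil => simp [pvSplitSp]
  | cons c w' ih =>
    have hc : c ≠ ' ' := by intro e; rw [e] at h; simp at h
    have hr : w'.count ' ' = 0 := by simpa [List.count_cons, hc] using h
    have := ih hr
    cases hsp : pvSplitSp (w' ++ ' ' :: rest) with
    | nil => exact absurd hsp (pvSplitSp_ne_nil _)
    | cons x xs =>
      rw [hsp] at this
      cases this
      simp [pvSplitSp, hc, hsp]

-- join of the middle/last part of B's output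
def pvJoinB : List (List Char) → List Char
  | [] => []
  | [w] => w
  | w :: ws => w.take 1 ++ ' ' :: pvJoinB ws

theorem pvJoinB_cons (w : List Char) (ws : List (List Char)) (h : ws ≠ []) :
    pvJoinB (w :: ws) = w.take 1 ++ ' ' :: pvJoinB ws := by
  cases ws with
  | nil => exact absurd rfl h
  | cons x xs => rfl

theorem pvLoopA_tail_aux (n : Nat) : ∀ cs : List Char, cs.count ' ' = n →
    pvLoopA cs false 0 = pvJoinB (pvSplitSp cs) := by
  induction n with
  | zero =>
    intro cs h
    rw [pvLoopA_nospace cs false 0 h, pvSplitSp_nospace cs h]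
    rfl
  | succ n ih =>
    intro cs h
    obtain ⟨w, r, rfl, hw⟩ := pvSplitAtSpace cs (by omega)
    have hr : r.count ' ' = n := by
      rw [List.count_append, List.count_cons] at h; simp [hw] at h; omega
    rw [pvLoopA_mid w r hw, pvSplitSp_append w r hw, ih r hr,
      pvJoinB_cons w _ (pvSplitSp_ne_nil r)]

theorem pvLoopA_tail (cs : List Char) :
    pvLoopA cs false 0 = pvJoinB (pvSplitSp cs) :=
  pvLoopA_tail_aux (cs.count ' ') cs rfl

theorem pvJoinB_enum (ws : List (List Char)) (j n : Int) (hj : 1 ≤ j)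
    (hn : n = j + ws.length) :
    PySem.Chars.join [' ']
      ((PySem.List.enumerate ws j).map (fun p => if p.1 = 0 ∨ p.1 = n - 1 then p.2 else p.2.take 1)) =
      pvJoinB ws := by
  induction ws generalizing j n with
  | nil => rfl
  | cons w ws ih =>
    cases ws with
    | nil =>
      have h0 : j ≠ 0 := by omega
      have h1 : j = n - 1 := by simp at hn; omega
      simp [PySem.List.enumerate, h0, ← h1, PySem.Chars.join_singleton, pvJoinB]
    | cons w' ws' =>
      have h0 : j ≠ 0 := by omega
      have h1 : j ≠ n - 1 := by simp at hn; omega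
      have hn' : n = (j + 1) + ((w' :: ws').length : Int) := by simp at hn ⊢; omega
      have ht := ih (j + 1) n (by omega) hn'
      rw [show PySem.List.enumerate (w :: w' :: ws') j
            = (j, w) :: PySem.List.enumerate (w' :: ws') (j + 1) from rfl, List.map_cons]
      rw [if_neg (by simp [h0, h1])]
      rw [show PySem.List.enumerate (w' :: ws') (j + 1)
            = (j + 1, w') :: PySem.List.enumerate ws' (j + 1 + 1) from rfl, List.map_cons] at ht ⊢
      rw [PySem.Chars.join_cons_cons, ht, pvJoinB_cons w (w' :: ws') (by simp)]
      simp

-- B's whole expression equals the model of A's loop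
theorem pvMain (cs : List Char) :
    pvLoopA cs true 0 =
      PySem.Chars.join [' ']
        ((PySem.List.enumerate (pvSplitSp cs)).map
          (fun p => if p.1 = 0 ∨ p.1 = PySem.List.len (pvSplitSp cs) - 1 then p.2 else p.2.take 1)) := by
  by_cases h : cs.count ' ' = 0
  · rw [pvLoopA_nospace cs true 0 h, pvSplitSp_nospace cs h]
    simp [PySem.List.enumerate, PySem.Chars.join_singleton]
  · obtain ⟨w, r, rfl, hw⟩ := pvSplitAtSpace cs h
    rw [pvLoopA_first w r 0 hw, pvLoopA_tail r, pvSplitSp_append w r hw]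
    obtain ⟨x, xs, hx⟩ : ∃ x xs, pvSplitSp r = x :: xs := by
      cases hsp : pvSplitSp r with
      | nil => exact absurd hsp (pvSplitSp_ne_nil r)
      | cons x xs => exact ⟨x, xs, rfl⟩
    rw [hx]
    rw [show PySem.List.enumerate (w :: x :: xs) = (0, w) :: PySem.List.enumerate (x :: xs) 1 from rfl]
    rw [List.map_cons, if_pos (by left; rfl)]
    have ht := pvJoinB_enum (x :: xs) 1 (PySem.List.len (w :: x :: xs)) (by omega)
      (by simp [PySem.List.len]; omega)
    rw [show PySem.List.enumerate (x :: xs) 1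
          = (1, x) :: PySem.List.enumerate xs (1 + 1) from rfl, List.map_cons] at ht ⊢
    rw [PySem.Chars.join_cons_cons, ht, ← hx, ← pvLoopA_tail r]
    simp

-- ===== VERDICT (by name: the statement is the Claim_ definition above) =====
theorem abreviar_nome_spec : Claim_equal_abreviar_nome := by
  intro nome _
  simp only [Spec_abreviar_nome, abreviar_nome, abreviar_nome_alt]
  rw [PySem.List.foldl_pyRange_pyGetD nome.toList ' '
      (fun q c => if c = ' ' then q + 1 else q) 0 (le_refl 0)]
  rw [PySem.List.foldl_pyRange_pyGetD nome.toList ' '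
      (fun s c => pvStepA _ s c) (([] : List Char), (0 : Nat), (0 : Nat)) (le_refl 0)]
  rw [show ((0 : Int)).toNat = 0 from rfl, List.drop_zero]
  rw [pvCount_eq nome.toList 0]
  rw [pvFoldA_eq (0 + nome.toList.count ' ') nome.toList [] 0 0 rfl]
  rw [show (decide ((0 : Nat) = 0)) = true from rfl]
  rw [pvMain nome.toList]
  rfl
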